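-- pv_equiv track=rewrite | github.com/Jdhaimson/NLP_CRT | symptoms_regex_decrypter.py | getName
-- ===== SOURCE A (Python) =====
-- def getName(regex):
--     if regex[0] != '(':
--         return regex
--     else:
--         output = ''
--         for c in regex:
--             if c == '(':
--                 continue
--             elif c == '|':
--                 return output
--             else:
--                 output += c
--         return regex
-- ===== SOURCE B (Python) =====
-- def getName(regex):
--     if regex[0] != '(':
--         return regex
--     if '|' in regex:
--         return regex[:regex.index('|')].replace('(', '')
--     return regex
-- ===== Notes on version B (the rewrite author's own statement) =====
-- stated objective: simpler
-- what changed: B locates the delimiter with index() and strips all parens from the prefix with replace(), instead of A's char-by-char accumulation loop with skip/early-return control flow.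
import Mathlib
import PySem

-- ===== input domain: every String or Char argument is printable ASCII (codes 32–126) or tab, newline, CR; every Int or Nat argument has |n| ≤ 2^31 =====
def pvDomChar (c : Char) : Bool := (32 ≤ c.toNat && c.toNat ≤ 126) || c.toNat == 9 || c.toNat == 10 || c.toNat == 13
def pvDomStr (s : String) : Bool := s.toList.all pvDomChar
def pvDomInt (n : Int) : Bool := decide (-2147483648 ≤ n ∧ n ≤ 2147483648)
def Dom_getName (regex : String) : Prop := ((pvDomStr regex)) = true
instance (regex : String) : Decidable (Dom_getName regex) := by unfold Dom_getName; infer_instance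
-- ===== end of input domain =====

-- B locates the '|' delimiter first and then strips all '(' from the prefix in one replace,
-- instead of A's char-by-char accumulation loop with early return (objective: simpler).

-- ===== PORT A =====
-- the 'for c in regex' loop: some output = the early 'return output', none = loop fell through
def getNameLoop (output : List Char) : List Char → Option (List Char)
  | [] => none
  | c :: cs =>
    if c = '(' then getNameLoop output cs
    else if c = '|' then some output
    else getNameLoop (output ++ [c]) cs

def getName (regex : String) : String :=
  match PySem.Str.pyGet? regex 0 with
  | none => regex    -- unreachable under Pre_ (Python raises IndexError on empty regex)
  | some c0 =>
    if c0 ≠ '(' then regex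
    else
      match getNameLoop [] regex.toList with
      | some out => String.ofList out
      | none => regex

-- ===== PORT B =====
def getName_alt (regex : String) : String :=
  match PySem.Str.pyGet? regex 0 with
  | none => regex    -- unreachable under Pre_ (Python raises IndexError on empty regex)
  | some c0 =>
    if c0 ≠ '(' then regex
    else if PySem.Str.isIn "|" regex then
      PySem.Str.replace (PySem.Str.slice regex none (some (PySem.Str.find regex "|"))) "(" ""
    else regex

-- ===== PRECONDITION & SPEC =====
-- Pre_ excludes only the empty string, on which Python A raises IndexError at regex[0].
def Pre_getName (regex : String) : Prop := regex ≠ ""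
instance (regex : String) : Decidable (Pre_getName regex) := by unfold Pre_getName; infer_instance
def pvWitness_getName : String := "(ab|c)"

def Spec_getName (regex : String) (out : String) : Prop := out = getName_alt regex
instance (regex : String) (out : String) : Decidable (Spec_getName regex out) := by unfold Spec_getName; infer_instance

-- ===== CLAIM (what is proved, stated in full; the proofs are below) =====
def Claim_equal_getName : Prop := ∀ (regex : String), Dom_getName regex → Pre_getName regex → Spec_getName regex (getName regex)

-- ===== LEMMAS AND PROOFS =====

-- A's loop: either returns the '('-stripped prefix before the first '|', or falls through
theorem getNameLoop_eq (l acc : List Char) :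
    getNameLoop acc l =
      if '|' ∈ l then some (acc ++ (l.takeWhile (· ≠ '|')).filter (· ≠ '(')) else none := by
  induction l generalizing acc with
  | nil => simp [getNameLoop]
  | cons c cs ih =>
    by_cases hp : c = '('
    · subst hp
      simp [getNameLoop, ih, List.mem_cons]
    · by_cases hb : c = '|'
      · subst hb; simp [getNameLoop]
      · have hb' : ¬ ('|' = c) := fun h => hb h.symm
        simp [getNameLoop, hp, hb, hb', ih, List.mem_cons]

-- replace.go with old = [c], new = [] is filter (· ≠ c), given enough fuel
theorem replace_go_filter (c : Char) (l : List Char) :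
    ∀ (fuel : Nat) (acc : List Char), l.length ≤ fuel →
      PySem.Chars.replace.go [c] [] fuel l acc = acc.reverse ++ l.filter (· ≠ c) := by
  induction l with
  | nil => intro fuel acc _; cases fuel <;> simp [PySem.Chars.replace.go]
  | cons x xs ih =>
    intro fuel acc hf
    cases fuel with
    | zero => simp at hf
    | succ f =>
      by_cases hx : x = c
      · subst hx
        simp [PySem.Chars.replace.go, List.isPrefixOf, ih f acc (by simpa using hf)]
      · have hpre : ¬ ([c].isPrefixOf (x :: xs) = true) := by
          simp [List.isPrefixOf]; exact fun h => (hx h.symm).elim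
        simp [PySem.Chars.replace.go, hpre, ih f (x :: acc) (by simpa using hf), hx]

theorem replace_filter (c : Char) (l : List Char) :
    PySem.Chars.replace l [c] [] = l.filter (· ≠ c) := by
  simpa using replace_go_filter c l l.length [] le_rfl

-- the first occurrence of c in l is at the end of takeWhile (· ≠ c)
theorem first_occ (c : Char) (l : List Char) (h : c ∈ l) :
    [c] <+: l.drop (l.takeWhile (· ≠ c)).length ∧
      ∀ i < (l.takeWhile (· ≠ c)).length, ¬ [c] <+: l.drop i := by
  induction l with
  | nil => simp at h
  | cons x xs ih =>
    by_cases hx : x = c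
    · subst hx
      refine ⟨?_, ?_⟩
      · simp
      · simp
    · have hc : c ∈ xs := by
        rcases List.mem_cons.mp h with h1 | h1
        · exact absurd h1.symm hx
        · exact h1
      obtain ⟨hp, hm⟩ := ih hc
      have ht : ((x :: xs).takeWhile (· ≠ c)).length = (xs.takeWhile (· ≠ c)).length + 1 := by
        simp [hx]
      refine ⟨?_, ?_⟩
      · rw [ht]; simpa using hp
      · intro i hi
        rw [ht] at hi
        cases i with
        | zero =>
          intro hpre
          have : x = c := by
            rcases hpre with ⟨t, ht2⟩
            simp at ht2
            exact ht2.1.symm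
          exact hx this
        | succ j =>
          have hj : j < (xs.takeWhile (· ≠ c)).length := by omega
          simpa using hm j hj

theorem find_singleton (c : Char) (l : List Char) (h : c ∈ l) :
    PySem.Chars.find l [c] = ((l.takeWhile (· ≠ c)).length : Int) := by
  have hin : [c] <:+: l := (List.singleton_infix_iff c l).mpr h
  have hnn : 0 ≤ PySem.Chars.find l [c] := (PySem.Chars.find_nonneg_iff _ _).mpr hin
  obtain ⟨hpre, hmin⟩ := PySem.Chars.find_spec hnn
  obtain ⟨hp2, hm2⟩ := first_occ c l h
  have heq : (PySem.Chars.find l [c]).toNat = (l.takeWhile (· ≠ c)).length := by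
    rcases Nat.lt_trichotomy (PySem.Chars.find l [c]).toNat (l.takeWhile (· ≠ c)).length with h1 | h1 | h1
    · exact absurd hpre (hm2 _ h1)
    · exact h1
    · exact absurd hp2 (hmin _ h1)
  omega

theorem take_takeWhile_length (p : Char → Bool) (l : List Char) :
    l.take (l.takeWhile p).length = l.takeWhile p :=
  (List.prefix_iff_eq_take.mp (List.takeWhile_prefix p)).symm

-- ===== VERDICT (by name: the statement is the Claim_ definition above) =====
theorem getName_spec : Claim_equal_getName := by
  intro regex _ hpre
  unfold Spec_getName getName getName_alt
  have hr : regex.toList ≠ [] := by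
    intro h0
    exact hpre (String.toList_inj.mp (by simp [h0]))
  obtain ⟨c, rest, hl⟩ : ∃ c rest, regex.toList = c :: rest := by
    cases h : regex.toList with
    | nil => exact absurd h hr
    | cons a as => exact ⟨a, as, rfl⟩
  have hget : PySem.Str.pyGet? regex 0 = some c := by
    simp [hl]
  rw [hget]
  by_cases hc : c = '('
  · subst hc
    simp only [ne_eq, not_true_eq_false, if_false]
    rw [getNameLoop_eq]
    by_cases hb : '|' ∈ regex.toList
    · have hisin : PySem.Str.isIn "|" regex = true := by
        have : PySem.Chars.isIn ("|".toList) regex.toList = true :=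
          (PySem.Chars.isIn_iff_infix _ _).mpr (by
            simpa using (List.singleton_infix_iff '|' regex.toList).mpr hb)
        simpa using this
      simp only [hb, if_true, hisin]
      apply String.toList_inj.mp
      have hfind : PySem.Str.find regex "|" =
          ((regex.toList.takeWhile (· ≠ '|')).length : Int) := by
        have := find_singleton '|' regex.toList hb
        simpa using this
      rw [PySem.Str.toList_replace, PySem.Str.toList_slice, hfind]
      have hsl : PySem.Chars.slice regex.toList none
          (some ((regex.toList.takeWhile (· ≠ '|')).length : Int)) =
          regex.toList.takeWhile (· ≠ '|') := by
        rw [PySem.Chars.slice_eq_listSlice, PySem.List.slice_to_natCast,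
          take_takeWhile_length]
      rw [hsl]
      have h1 : ("(" : String).toList = ['('] := by decide
      have h2 : ("" : String).toList = [] := by decide
      rw [h1, h2, replace_filter]
      simp
    · have hisin : PySem.Str.isIn "|" regex = false := by
        have : PySem.Chars.isIn ("|".toList) regex.toList = false :=
          (PySem.Chars.isIn_eq_false_iff _ _).mpr (by
            intro hinf
            exact hb ((List.singleton_infix_iff '|' regex.toList).mp (by simpa using hinf)))
        simpa using this
      have hisin' : PySem.Chars.isIn ['|'] regex.toList = false := by simpa using hisin
      simp [hb, hisin']
  · simp [hc]
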